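-- pv_equiv track=rewrite | github.com/PRKKILLER/Algorithm_Practice | Company-OA/Robinhood/SortMatrixByOccurrence.py | solution
-- ===== SOURCE A (Python) =====
-- from collections import Counter
--
-- def solution(arr):
--     tmp = [x for row in arr for x in row]
--     c = list(dict(Counter(tmp)).items())
--     c = sorted(c, key=lambda x: (x[1], x[0]))
--
--     flattened = []
--     for item in c:
--         flattened += [item[0]] * item[1]
--
--     idx = 0
--     for i in range(len(arr)-1, -1, -1):
--         for j in range(len(arr[0])-1, -1, -1):
--             arr[i][j] = flattened[idx]
--             idx += 1
--
--     return arr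
-- ===== SOURCE B (Python) =====
-- def solution(arr):
--     # Selection by repeated minimum: peel the least-frequent/smallest value
--     # group off the flat cell list, group by group (no Counter, no sort),
--     # then pour the result back from the bottom-right corner to the top-left.
--     flat = [x for row in arr for x in row]
--     asc = []
--     while flat:
--         v = min(flat, key=lambda x: (flat.count(x), x))
--         asc += [v] * flat.count(v)
--         flat = [x for x in flat if x != v]
--     it = iter(asc)
--     for i in reversed(range(len(arr))):
--         for j in reversed(range(len(arr[0]))):
--             arr[i][j] = next(it)
--     return arr
-- ===== Notes on version B (the rewrite author's own statement) =====
-- stated objective: alternative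
-- what changed: B replaces A's Counter + comparison sort of the distinct (value,count) items + expand-by-count pipeline with a selection loop that repeatedly extracts the minimal (count, value) group from the flat cell list (no Counter, no sort call), and pours the result back through an iterator instead of A's running index; B mutates arr in place exactly as A does.
import Mathlib
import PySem

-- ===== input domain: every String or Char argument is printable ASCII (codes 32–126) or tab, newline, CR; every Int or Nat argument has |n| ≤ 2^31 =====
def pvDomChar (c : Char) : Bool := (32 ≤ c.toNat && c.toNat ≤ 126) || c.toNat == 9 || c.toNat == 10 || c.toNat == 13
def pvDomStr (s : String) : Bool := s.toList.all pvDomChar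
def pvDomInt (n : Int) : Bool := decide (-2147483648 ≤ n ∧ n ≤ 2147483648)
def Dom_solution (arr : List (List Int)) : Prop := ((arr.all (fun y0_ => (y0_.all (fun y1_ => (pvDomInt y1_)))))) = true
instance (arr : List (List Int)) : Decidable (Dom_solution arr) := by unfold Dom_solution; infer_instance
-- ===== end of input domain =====

-- B replaces A's Counter + sort-the-distinct-items + expand-by-count pipeline by a selection loop
-- that repeatedly extracts the minimal (count, value) group from the flat cell list (no Counter,
-- no sort call) and pours the result back through an iterator (objective: alternative). Both A and
-- B mutate arr in place in the same way; the equivalence proved here is about return values.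

-- ===== PORT A =====
-- inner 'for j in range(len(arr[0])-1, -1, -1)' loop of A (len(arr[0]) read from the CURRENT state,
-- as Python does). 'arr[i][j] = v' is ported as set i.toNat / set j.toNat with pyGetD reads: on the
-- rectangular inputs admitted by Pre_solution every index is nonnegative and in range, so the
-- defaults are never hit (Python raises IndexError exactly on inputs Pre_solution excludes).
def solutionFillInner (flattened : List Int) (st : List (List Int) × Int) (i : Int) :
    List (List Int) × Int :=
  (PySem.List.pyRange (((PySem.List.pyGetD st.1 0 []).length : Int) - 1) (-1) (-1)).foldl
    (fun st j =>
      (st.1.set i.toNat ((PySem.List.pyGetD st.1 i []).set j.toNat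
          (PySem.List.pyGetD flattened st.2 0)),
       st.2 + 1)) st

def solution (arr : List (List Int)) : List (List Int) :=
  let tmp := arr.flatMap (fun row => row)
  let c := (PySem.Dict.counter tmp).items
  let c2 := PySem.List.sorted2 c (fun x => x.2) (fun x => x.1) false
  let flattened := c2.foldl (fun acc item => acc ++ PySem.List.pyRepeat [item.1] item.2) []
  ((PySem.List.pyRange ((arr.length : Int) - 1) (-1) (-1)).foldl
      (solutionFillInner flattened) (arr, 0)).1

-- ===== PORT B =====
-- 'min(flat, key=lambda x: (flat.count(x), x))' is PySem.List.min2?; the while-loop guard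
-- 'while flat' is the none case (min2? = none ↔ flat = []).
theorem pvMin2Eq (xs : List Int) (k1 k2 : Int → Int) :
    PySem.List.min2? xs k1 k2 = PySem.List.min? xs (fun x => toLex (k1 x, k2 x)) := by
  unfold PySem.List.min2? PySem.List.min?
  apply PySem.List.foldl_congr_mem
  intro acc x _
  cases acc with
  | none => rfl
  | some m =>
    rcases lt_trichotomy (k1 x) (k1 m) with h | h | h
    · simp [h, Prod.Lex.lt_iff]
    · simp [h, Prod.Lex.lt_iff]
    · simp [h, Prod.Lex.lt_iff, asymm h, h.ne']

def selAsc (flat : List Int) (asc : List Int) : List Int :=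
  match h : PySem.List.min2? flat (fun x => (flat.count x : Int)) (fun x => x) with
  | none => asc
  | some v => selAsc (flat.filter (fun x => x != v))
      (asc ++ List.replicate (flat.count v) v)
termination_by flat.length
decreasing_by
  simp only [List.unattach_filter, List.unattach_attach]
  rw [List.length_filter_lt_length_iff_exists]
  exact ⟨v, PySem.List.min?_mem (pvMin2Eq flat _ _ ▸ h), by simp⟩

-- inner 'for j in reversed(range(len(arr[0])))' loop; 'arr[i][j] = next(it)' is ported as
-- set i / set j with headD/tail on the stream: on inputs admitted by Pre_solution every index is
-- in range and the stream holds at least as many values as there are visited cells, so the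
-- getD/headD defaults are never hit (Python raises IndexError exactly on the excluded inputs).
def solutionFillInnerAlt (st : List (List Int) × List Int) (i : Nat) :
    List (List Int) × List Int :=
  (List.range (PySem.List.pyGetD st.1 0 []).length).reverse.foldl
    (fun st' j => (st'.1.set i ((st'.1.getD i []).set j (st'.2.headD 0)), st'.2.tail)) st

def solution_alt (arr : List (List Int)) : List (List Int) :=
  let flat := arr.flatMap (fun row => row)
  let asc := selAsc flat []
  (((List.range arr.length).reverse).foldl solutionFillInnerAlt (arr, asc)).1

-- ===== PRECONDITION & SPEC =====
-- Pre_ is exactly A's domain: every row at least as long as the first (A raises IndexError as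
-- soon as some row is shorter than row 0; on every other input A returns normally).
def Pre_solution (arr : List (List Int)) : Prop :=
  ∀ row ∈ arr, (arr.headD []).length ≤ row.length
instance (arr : List (List Int)) : Decidable (Pre_solution arr) := by
  unfold Pre_solution; infer_instance
def pvWitness_solution : List (List Int) := [[1, 2], [2, 3]]

def Spec_solution (arr : List (List Int)) (out : List (List Int)) : Prop := out = solution_alt arr
instance (arr : List (List Int)) (out : List (List Int)) : Decidable (Spec_solution arr out) := by
  unfold Spec_solution; infer_instance

-- ===== CLAIM (what is proved, stated in full; the proofs are below) =====
def Claim_equal_solution : Prop :=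
  ∀ (arr : List (List Int)), Dom_solution arr → Pre_solution arr → Spec_solution arr (solution arr)

-- ===== LEMMAS AND PROOFS =====

-- range(k-1, -1, -1) is [k-1, k-2, …, 0]
theorem pvRangeDown (n : Nat) :
    PySem.List.pyRange ((n : Int) - 1) (-1) (-1) =
      (List.range n).map (fun (k : Nat) => (n : Int) - 1 - (k : Int)) := by
  unfold PySem.List.pyRange
  norm_num
  rcases n with _ | n
  · simp
  · rw [if_pos (Nat.succ_pos n)]
    apply List.map_congr_left
    intro k _
    ring

theorem pvDropSet {α : Type} (r : List α) (x : α) (n : Nat) (h : n < r.length) :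
    (r.set n x).drop n = x :: r.drop (n+1) := by
  rw [List.drop_set, if_neg (by omega), Nat.sub_self, List.drop_eq_getElem_cons h]
  rfl

theorem pvGetDSetNe {α : Type} (d : α) (r : List α) (x : α) (n k : Nat) (h : k ≠ n) :
    (r.set n x).getD k d = r.getD k d := by
  simp [List.getD_eq_getElem?_getD, List.getElem?_set_ne (by omega : n ≠ k)]

-- A's inner fill loop shape: writes at descending positions b, b-1, …, b-c+1, cursor advancing by δ
theorem pvGenFold {α : Type} (w : Int → α) (δ : Int) :
    ∀ (c b : Nat) (r : List α) (idx : Int), c ≤ b + 1 → (c = 0 ∨ b < r.length) →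
      (List.range c).foldl (fun (s : List α × Int) k => (s.1.set (b - k) (w s.2), s.2 + δ)) (r, idx)
        = (r.take (b + 1 - c) ++
            (List.range c).map (fun (q : Nat) => w (idx + δ * ((c : Int) - 1 - (q : Int)))) ++
            r.drop (b + 1),
           idx + δ * c) := by
  intro c
  induction c with
  | zero => intro b r idx _ _; simp
  | succ c ih =>
    intro b r idx hc hb
    have hbr : b < r.length := hb.resolve_left (by omega)
    rcases b with _ | b
    · have hc0 : c = 0 := by omega
      subst hc0
      rcases r with _ | ⟨a, r⟩
      · simp at hbr
      · simp only [List.range_one, List.foldl_cons, List.foldl_nil, Nat.sub_self,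
          List.set_cons_zero, Nat.zero_add, List.take_zero, List.nil_append,
          List.map_cons, List.drop_succ_cons, List.drop_zero]
        apply Prod.ext
        · show w idx :: r = _ ++ r
          norm_num
        · show idx + δ = _
          push_cast
          ring
    · conv_lhs => rw [List.range_succ_eq_map]
      rw [List.foldl_cons, List.foldl_map]
      simp only [Nat.sub_zero, Nat.succ_sub_succ]
      rw [ih b (r.set (b+1) (w idx)) (idx + δ) (by omega) (by right; simp; omega)]
      have htake : (r.set (b+1) (w idx)).take (b + 1 - c) = r.take (b + 1 - c) :=
        List.take_set_of_le (by omega)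
      have hdrop : (r.set (b+1) (w idx)).drop (b + 1) = w idx :: r.drop (b + 2) :=
        pvDropSet r (w idx) (b+1) hbr
      rw [htake, hdrop, List.range_succ, List.map_append]
      have h3 : (List.range c).map
            (fun (q : Nat) => w (idx + δ + δ * ((c : Int) - 1 - (q : Int))))
          = (List.range c).map
            (fun (q : Nat) => w (idx + δ * (((c + 1 : Nat) : Int) - 1 - (q : Int)))) := by
        apply List.map_congr_left
        intro q _
        congr 1
        push_cast
        ring
      rw [h3]
      have h4 : ([c].map (fun (q : Nat) => w (idx + δ * (((c + 1 : Nat) : Int) - 1 - (q : Int)))))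
          = [w idx] := by
        norm_num
      apply Prod.ext
      · show _ ++ _ ++ (w idx :: _) = _
        rw [h4]
        simp [List.append_assoc]
      · show idx + δ + δ * (c : Int) = idx + δ * (((c + 1 : Nat) : Int))
        push_cast
        ring

-- Python's sorted(xs, key=lambda x: (k1(x), k2(x))) sorts by the lexicographic key
theorem pvSorted2Lex {α : Type} (xs : List α) (k1 k2 : α → Int) :
    PySem.List.sorted2 xs k1 k2 false =
      PySem.List.sorted xs (fun x => toLex (k1 x, k2 x)) false := by
  unfold PySem.List.sorted2 PySem.List.sorted
  simp only [if_neg (by simp : ¬ (false = true))]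
  congr 1
  funext acc x
  congr 1
  funext a b
  rcases lt_trichotomy (k1 a) (k1 b) with h | h | h
  · simp [h, Prod.Lex.lt_iff, not_lt.mpr h.le]
  · simp [h, Prod.Lex.lt_iff]
  · simp [Prod.Lex.lt_iff, asymm h, h.ne', h]

theorem pvCountFlatMapReplicate (L : List Int) (S : List Int) (hS : S.Nodup) (a : Int) :
    (S.flatMap (fun k => List.replicate (L.count k) k)).count a =
      if a ∈ S then L.count a else 0 := by
  induction S with
  | nil => simp
  | cons s S ih =>
    simp only [List.flatMap_cons, List.count_append, List.nodup_cons] at *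
    rw [ih hS.2]
    by_cases h : a = s
    · subst h
      simp [hS.1]
    · simp [List.count_replicate, h, Ne.symm h]

theorem pvExpandPerm (L : List Int) :
    ((PySem.Set.ofList L).flatMap (fun k => List.replicate (L.count k) k)).Perm L := by
  rw [List.perm_iff_count]
  intro a
  rw [pvCountFlatMapReplicate L _ (PySem.Set.nodup_ofList L) a]
  by_cases h : a ∈ L
  · simp [PySem.Set.mem_ofList, h]
  · simp [PySem.Set.mem_ofList, h, List.count_eq_zero_of_not_mem h]

-- expanding A's sorted counter items by their counts is one stable sort of the whole flat list
theorem pvExpandEqSortAll (L : List Int) :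
    (PySem.List.sorted2 ((PySem.Dict.counter L).items)
        (fun x => x.2) (fun x => x.1) false).flatMap
        (fun it => List.replicate it.2.toNat it.1) =
      PySem.List.sorted2 L (fun x => PySem.Dict.getD (PySem.Dict.counter L) x 0)
        (fun x => x) false := by
  rw [pvSorted2Lex, pvSorted2Lex]
  have hkey : (fun x : Int => toLex (PySem.Dict.getD (PySem.Dict.counter L) x 0, x))
      = fun x : Int => toLex ((L.count x : Int), x) := by
    funext x; rw [PySem.Dict.getD_counter]
  rw [hkey]
  set key : Int → Lex (Int × Int) := fun x => toLex ((L.count x : Int), x) with hkeydef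
  have hmem : ∀ it : Int × Int,
      it ∈ PySem.List.sorted ((PySem.Dict.counter L).items)
          (fun x => toLex (x.2, x.1)) false →
      it.2 = (L.count it.1 : Int) := by
    intro it hit
    have h1 : it ∈ (PySem.Dict.counter L).items :=
      (PySem.List.sorted_perm _ _ _).mem_iff.mp hit
    rw [PySem.Dict.items_counter] at h1
    obtain ⟨k, _, rfl⟩ := List.mem_map.mp h1
    rfl
  apply PySem.List.eq_of_perm_of_pairwise_le_of_injective key
  · intro a b h
    have := congrArg (fun p : Lex (Int × Int) => (ofLex p).2) h
    simpa [hkeydef] using this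
  · refine List.Perm.trans ?_ (PySem.List.sorted_perm L key false).symm
    refine List.Perm.trans
      (List.Perm.flatMap (PySem.List.sorted_perm _ _ _) (fun a _ => List.Perm.refl _)) ?_
    rw [PySem.Dict.items_counter, List.flatMap_map]
    simp only [Int.toNat_natCast]
    exact pvExpandPerm L
  · rw [List.pairwise_flatMap]
    constructor
    · intro it _
      rw [List.pairwise_replicate]
      right; exact le_refl _
    · have hpw := PySem.List.sorted_pairwise ((PySem.Dict.counter L).items)
        (fun x : Int × Int => toLex (x.2, x.1))
      refine hpw.imp_of_mem ?_
      intro a b ha hb hab x hx y hy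
      rw [List.mem_replicate] at hx hy
      rw [hx.2, hy.2, hkeydef]
      have h2 : ∀ it : Int × Int,
          it ∈ PySem.List.sorted ((PySem.Dict.counter L).items)
              (fun x => toLex (x.2, x.1)) false →
          toLex ((L.count it.1 : Int), it.1) = toLex (it.2, it.1) := by
        intro it hit; rw [hmem it hit]
      calc toLex ((L.count a.1 : Int), a.1) = toLex (a.2, a.1) := h2 a ha
        _ ≤ toLex (b.2, b.1) := hab
        _ = toLex ((L.count b.1 : Int), b.1) := (h2 b hb).symm
  · exact PySem.List.sorted_pairwise L key

-- A's inner loop only ever touches row i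
theorem pvInnerToRow (F : List Int) (i : Int) :
    ∀ (js : List Int) (a : List (List Int)) (idx : Int), 0 ≤ i → i.toNat < a.length →
      js.foldl (fun (st : List (List Int) × Int) j =>
          (st.1.set i.toNat ((PySem.List.pyGetD st.1 i []).set j.toNat
              (PySem.List.pyGetD F st.2 0)), st.2 + 1)) (a, idx)
        = (a.set i.toNat
            ((js.foldl (fun (s : List Int × Int) j =>
                (s.1.set j.toNat (PySem.List.pyGetD F s.2 0), s.2 + 1))
              (a[i.toNat]!, idx)).1),
           (js.foldl (fun (s : List Int × Int) j =>
                (s.1.set j.toNat (PySem.List.pyGetD F s.2 0), s.2 + 1))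
              (a[i.toNat]!, idx)).2) := by
  intro js
  induction js with
  | nil =>
    intro a idx h0 hlen
    simp only [List.foldl_nil]
    rw [getElem!_pos a i.toNat hlen]
    simp [List.set_getElem_self]
  | cons j js ih =>
    intro a idx h0 hlen
    simp only [List.foldl_cons]
    rw [ih _ _ h0 (by simpa using hlen)]
    have hget : PySem.List.pyGetD a i [] = a[i.toNat]! := by
      rw [PySem.List.pyGetD_of_nonneg a [] h0, getElem!_pos a i.toNat hlen,
        List.getD_eq_getElem?_getD, List.getElem?_eq_getElem hlen]
      rfl
    rw [hget]
    have hset : (a.set i.toNat (a[i.toNat]!.set j.toNat (PySem.List.pyGetD F idx 0)))[i.toNat]!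
        = a[i.toNat]!.set j.toNat (PySem.List.pyGetD F idx 0) := by
      rw [getElem!_pos _ i.toNat (by simpa using hlen), List.getElem_set_self]
    rw [hset, List.set_set]

-- the row A's inner loop writes when the cursor starts at idx
def pvRow (F : List Int) (m : Nat) (idx : Int) : List Int :=
  (List.range m).map (fun (q : Nat) => PySem.List.pyGetD F (idx + ((m : Int) - 1 - (q : Int))) 0)

theorem pvInnerClean (F : List Int) (m : Nat) (a : List (List Int)) (idx : Int) (i : Int)
    (ha : a ≠ []) (h0 : (PySem.List.pyGetD a 0 []).length = m)
    (hge : m ≤ a[i.toNat]!.length) (hi0 : 0 ≤ i) (hi : i.toNat < a.length) :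
    solutionFillInner F (a, idx) i
      = (a.set i.toNat (pvRow F m idx ++ a[i.toNat]!.drop m), idx + m) := by
  unfold solutionFillInner
  rw [show ((PySem.List.pyGetD (a, idx).1 0 []).length : Int) = (m : Int) by rw [h0]]
  rw [pvRangeDown m, pvInnerToRow F i _ a idx hi0 hi, List.foldl_map]
  have hcongr : (List.range m).foldl
      (fun (s : List Int × Int) (k : Nat) =>
        (s.1.set ((m : Int) - 1 - (k : Int)).toNat (PySem.List.pyGetD F s.2 0), s.2 + 1))
      (a[i.toNat]!, idx)
    = (List.range m).foldl
      (fun (s : List Int × Int) (k : Nat) =>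
        (s.1.set (m - 1 - k) (PySem.List.pyGetD F s.2 0), s.2 + 1))
      (a[i.toNat]!, idx) := by
    apply PySem.List.foldl_congr_mem
    intro acc k hk
    rw [List.mem_range] at hk
    congr 1
    · congr 1
      omega
  rw [hcongr]
  rcases Nat.eq_zero_or_pos m with hm | hm
  · subst hm
    simp only [List.range_zero, List.foldl_nil, pvRow, List.map_nil, List.drop_zero,
      List.nil_append, Nat.cast_zero, add_zero]
  · rw [pvGenFold (fun t => PySem.List.pyGetD F t 0) 1 m (m-1) a[i.toNat]! idx
      (by omega) (by right; omega)]
    have h1 : m - 1 + 1 - m = 0 := by omega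
    have h2 : m - 1 + 1 = m := by omega
    rw [h1, h2, List.take_zero, List.nil_append]
    apply Prod.ext
    · simp only []
      congr 1
      unfold pvRow
      congr 1
      apply List.map_congr_left
      intro q _
      congr 1
      ring
    · show idx + 1 * (m : Int) = idx + (m : Int)
      ring

theorem pvOuterClean (F : List Int) (m : Nat) :
    ∀ (ks : List Int) (a : List (List Int)) (idx : Int), a ≠ [] →
      (PySem.List.pyGetD a 0 []).length = m → (∀ r ∈ a, m ≤ r.length) →
      (∀ i ∈ ks, 0 ≤ i ∧ i.toNat < a.length) →
      ks.foldl (solutionFillInner F) (a, idx)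
        = ks.foldl (fun (s : List (List Int) × Int) i =>
            (s.1.set i.toNat (pvRow F m s.2 ++ (s.1.getD i.toNat []).drop m), s.2 + m))
            (a, idx) := by
  intro ks
  induction ks with
  | nil => intro a idx _ _ _ _; rfl
  | cons i ks ih =>
    intro a idx ha h0 hrect hks
    obtain ⟨hi0, hilen⟩ := hks i (List.mem_cons_self)
    have hgetD : a.getD i.toNat [] = a[i.toNat]! := by
      rw [getElem!_pos a i.toNat hilen, List.getD_eq_getElem?_getD,
        List.getElem?_eq_getElem hilen]
      rfl
    simp only [List.foldl_cons]
    have hgei : m ≤ a[i.toNat]!.length := by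
      rw [getElem!_pos a i.toNat hilen]
      exact hrect _ (List.getElem_mem hilen)
    rw [pvInnerClean F m a idx i ha h0 hgei hi0 hilen, hgetD]
    have hrowlen : (pvRow F m idx).length = m := by simp [pvRow]
    have hnewlen : (pvRow F m idx ++ a[i.toNat]!.drop m).length = a[i.toNat]!.length := by
      rw [List.length_append, hrowlen, List.length_drop]
      omega
    apply ih
    · intro h
      apply ha
      have := congrArg List.length h
      simp at this
      exact this
    · have hlen0 : 0 < a.length := List.length_pos_iff.mpr ha
      have hget0 : ∀ (b : List (List Int)), b ≠ [] →
          PySem.List.pyGetD b 0 [] = b.getD 0 [] := by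
        intro b hb
        rw [show (0 : Int) = ((0 : Nat) : Int) from rfl, PySem.List.pyGetD_natCast]
      rw [hget0 _ (by intro h; apply ha; have := congrArg List.length h; simpa using this)]
      rw [hget0 _ ha] at h0
      by_cases hiz : i.toNat = 0
      · rw [hiz] at hgetD hnewlen ⊢
        rw [List.getD_eq_getElem?_getD, List.getElem?_set_self (by omega)]
        simp only [Option.getD_some]
        rw [hnewlen, ← hgetD]
        exact h0
      · rw [pvGetDSetNe [] a _ _ _ (by omega)]
        exact h0
    · intro r hr
      rcases List.mem_or_eq_of_mem_set hr with h | h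
      · exact hrect r h
      · subst h
        rw [hnewlen]
        exact le_trans hgei (le_refl _)
    · intro j hj
      obtain ⟨h1, h2⟩ := hks j (List.mem_cons_of_mem _ hj)
      exact ⟨h1, by simpa using h2⟩

-- ----- B-side lemmas: the selection loop produces the ascending sorted flat list -----

-- the lex key (count in L, value); injective in the value
def pvKey (L : List Int) (x : Int) : Lex (Int × Int) := toLex ((L.count x : Int), x)

theorem pvSelNone (L d : List Int)
    (h : PySem.List.min2? L (fun x => (L.count x : Int)) (fun x => x) = none) :
    selAsc L d = d := by
  rw [selAsc.eq_def]
  split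
  · rfl
  · rename_i v' h'
    rw [h] at h'
    cases h'

theorem pvSelSome (L d : List Int) (v : Int)
    (h : PySem.List.min2? L (fun x => (L.count x : Int)) (fun x => x) = some v) :
    selAsc L d
      = selAsc (L.filter (fun x => x != v)) (d ++ List.replicate (L.count v) v) := by
  rw [selAsc.eq_def]
  split
  · rename_i h'
    rw [h] at h'
    cases h'
  · rename_i v' h'
    rw [h] at h'
    cases h'
    rfl

theorem pvSelAcc : ∀ (k : Nat) (L d : List Int), L.length ≤ k →
    selAsc L d = d ++ selAsc L [] := by
  intro k
  induction k with
  | zero =>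
    intro L d h
    have : L = [] := List.length_eq_zero_iff.mp (by omega)
    subst this
    rw [pvSelNone [] d rfl, pvSelNone [] [] rfl, List.append_nil]
  | succ k ih =>
    intro L d h
    cases hm : PySem.List.min2? L (fun x => (L.count x : Int)) (fun x => x) with
    | none => rw [pvSelNone L d hm, pvSelNone L [] hm, List.append_nil]
    | some v =>
      have hv : v ∈ L := PySem.List.min?_mem (pvMin2Eq L _ _ ▸ hm)
      have hlt : (L.filter (fun x => x != v)).length < L.length := by
        rw [List.length_filter_lt_length_iff_exists]
        exact ⟨v, hv, by simp⟩
      rw [pvSelSome L d v hm, pvSelSome L [] v hm]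
      rw [ih _ _ (by omega), ih _ (([] : List Int) ++ _) (by omega)]
      simp [List.append_assoc]

theorem pvCountFilterNe (L : List Int) (v x : Int) (hx : x ≠ v) :
    (L.filter (fun y => y != v)).count x = L.count x :=
  List.count_filter (by simp [hx])

theorem pvSelSpec : ∀ (k : Nat) (L : List Int), L.length ≤ k →
    (selAsc L []).Perm L ∧
      (selAsc L []).Pairwise (fun a b => pvKey L a ≤ pvKey L b) := by
  intro k
  induction k with
  | zero =>
    intro L h
    have : L = [] := List.length_eq_zero_iff.mp (by omega)
    subst this
    rw [pvSelNone [] [] rfl]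
    simp
  | succ k ih =>
    intro L h
    cases hm : PySem.List.min2? L (fun x => (L.count x : Int)) (fun x => x) with
    | none =>
      have hnil : L = [] := (PySem.List.min?_eq_none_iff _ _).mp (pvMin2Eq L _ _ ▸ hm)
      subst hnil
      rw [pvSelNone [] [] rfl]
      simp
    | some v =>
      have hv : v ∈ L := PySem.List.min?_mem (pvMin2Eq L _ _ ▸ hm)
      have hmin : ∀ y ∈ L, pvKey L v ≤ pvKey L y :=
        PySem.List.min?_isMin (pvMin2Eq L _ _ ▸ hm)
      set L' := L.filter (fun x => x != v) with hL'
      have hlt : L'.length < L.length := by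
        rw [hL', List.length_filter_lt_length_iff_exists]
        exact ⟨v, hv, by simp⟩
      obtain ⟨ihp, ihs⟩ := ih L' (by omega)
      have hmemL' : ∀ x ∈ L', x ∈ L ∧ x ≠ v := by
        intro x hx
        rw [hL', List.mem_filter] at hx
        exact ⟨hx.1, by simpa using hx.2⟩
      have hkey' : ∀ x ∈ L', pvKey L' x = pvKey L x := by
        intro x hx
        unfold pvKey
        rw [hL', pvCountFilterNe L v x (hmemL' x hx).2]
      rw [pvSelSome L [] v hm, ← hL', pvSelAcc L'.length L' _ le_rfl, List.nil_append]
      constructor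
      · refine List.Perm.trans (List.Perm.append_left _ ihp) ?_
        have hrep : List.replicate (L.count v) v = L.filter (fun x => x == v) := by
          rw [List.filter_beq]
        rw [hrep, hL']
        have := List.filter_append_perm (fun x => x == v) L
        refine List.Perm.trans ?_ this
        apply List.Perm.append_left
        apply List.Perm.of_eq
        apply List.filter_congr
        intro x _
        simp [bne]
      · rw [List.pairwise_append]
        refine ⟨?_, ?_, ?_⟩
        · rw [List.pairwise_replicate]
          right; exact le_refl _
        · refine ihs.imp_of_mem ?_
          intro a b ha hb hab
          rw [← hkey' a (ihp.mem_iff.mp ha), ← hkey' b (ihp.mem_iff.mp hb)]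
          exact hab
        · intro a ha b hb
          have hav : a = v := (List.eq_of_mem_replicate ha)
          subst hav
          exact hmin b (hmemL' b (ihp.mem_iff.mp hb)).1

-- the selection loop IS the ascending stable sort by (count, value)
theorem pvSelEq (L : List Int) :
    selAsc L [] =
      PySem.List.sorted2 L (fun x => (L.count x : Int)) (fun x => x) false := by
  rw [pvSorted2Lex]
  obtain ⟨hp, hs⟩ := pvSelSpec L.length L le_rfl
  apply PySem.List.eq_of_perm_of_pairwise_le_of_injective (pvKey L)
  · intro a b h
    have := congrArg (fun p : Lex (Int × Int) => (ofLex p).2) h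
    simpa [pvKey] using this
  · exact hp.trans (PySem.List.sorted_perm L _ false).symm
  · exact hs
  · exact PySem.List.sorted_pairwise L (pvKey L)

-- ----- B-side lemmas: the iterator refill is A's cursor refill -----

theorem pvRevRange : ∀ (n : Nat),
    (List.range n).reverse = (List.range n).map (fun k => n - 1 - k) := by
  intro n
  apply List.ext_getElem
  · simp
  · intro k h1 h2
    rw [List.getElem_reverse, List.getElem_map, List.getElem_range, List.getElem_range]
    simp only [List.length_reverse, List.length_range, List.length_map] at h1 h2 ⊢

theorem pvTailGetD (l : List Int) (i : Nat) : l.tail.getD i 0 = l.getD (i+1) 0 := by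
  cases l <;> simp

theorem pvTailDrop (l : List Int) (m : Nat) : l.tail.drop m = l.drop (m+1) := by
  cases l <;> simp

-- the row-level stream loop: writes cells m-1, …, 0 from the stream's front
theorem pvStreamRow : ∀ (m : Nat) (row rest : List Int), m ≤ row.length →
    (List.range m).reverse.foldl
        (fun (s : List Int × List Int) j => (s.1.set j (s.2.headD 0), s.2.tail)) (row, rest)
      = ((List.range m).map (fun q => rest.getD (m - 1 - q) 0) ++ row.drop m, rest.drop m) := by
  intro m
  induction m with
  | zero => intro row rest _; simp
  | succ m ih =>
    intro row rest hlen
    rw [List.range_succ, List.reverse_append, List.reverse_singleton, List.singleton_append,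
      List.foldl_cons]
    rw [ih (row.set m (rest.headD 0)) rest.tail (by simpa using Nat.le_of_succ_le hlen)]
    rw [pvDropSet row (rest.headD 0) m (by omega)]
    rw [List.map_append]
    have h1 : (List.range m).map (fun q => rest.tail.getD (m - 1 - q) 0)
        = (List.range m).map (fun q => rest.getD (m + 1 - 1 - q) 0) := by
      apply List.map_congr_left
      intro q hq
      rw [List.mem_range] at hq
      rw [pvTailGetD]
      congr 1
      omega
    have h2 : ([m].map (fun q => rest.getD (m + 1 - 1 - q) 0)) = [rest.headD 0] := by
      simp only [List.map_cons, List.map_nil]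
      rw [show m + 1 - 1 - m = 0 by omega]
      cases rest <;> rfl
    apply Prod.ext
    · show _ ++ (rest.headD 0 :: _) = _ ++ _ ++ _
      rw [h1, h2]
      simp [List.append_assoc]
    · show rest.tail.drop m = rest.drop (m+1)
      exact pvTailDrop rest m

-- B's inner loop only ever touches row i
theorem pvInnerToRowAlt (i : Nat) :
    ∀ (js : List Nat) (a : List (List Int)) (rest : List Int), i < a.length →
      js.foldl (fun (st : List (List Int) × List Int) j =>
          (st.1.set i ((st.1.getD i []).set j (st.2.headD 0)), st.2.tail)) (a, rest)
        = (a.set i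
            ((js.foldl (fun (s : List Int × List Int) j =>
                (s.1.set j (s.2.headD 0), s.2.tail)) (a.getD i [], rest)).1),
           (js.foldl (fun (s : List Int × List Int) j =>
                (s.1.set j (s.2.headD 0), s.2.tail)) (a.getD i [], rest)).2) := by
  intro js
  induction js with
  | nil =>
    intro a rest hlen
    simp only [List.foldl_nil]
    rw [List.getD_eq_getElem _ _ hlen]
    simp [List.set_getElem_self]
  | cons j js ih =>
    intro a rest hlen
    simp only [List.foldl_cons]
    rw [ih _ _ (by simpa using hlen)]
    have hset : (a.set i ((a.getD i []).set j (rest.headD 0))).getD i []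
        = (a.getD i []).set j (rest.headD 0) := by
      rw [List.getD_eq_getElem _ _ (by simpa using hlen), List.getElem_set_self]
    rw [hset, List.set_set]

-- under the width invariant B's inner loop replaces the first m cells of row i (tail kept)
-- and consumes m stream values
theorem pvInnerCleanAlt (m : Nat) (a : List (List Int)) (rest : List Int) (i : Nat)
    (h0 : (PySem.List.pyGetD a 0 []).length = m)
    (hge : m ≤ (a.getD i []).length) (hi : i < a.length) :
    solutionFillInnerAlt (a, rest) i
      = (a.set i ((List.range m).map (fun q => rest.getD (m - 1 - q) 0)
            ++ (a.getD i []).drop m),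
         rest.drop m) := by
  unfold solutionFillInnerAlt
  rw [show (PySem.List.pyGetD (a, rest).1 0 []).length = m from h0]
  rw [pvInnerToRowAlt i _ a rest hi, pvStreamRow m (a.getD i []) rest hge]

-- B's chunk of the stream F.drop t is exactly the row A writes with cursor t
theorem pvChunkRow (F : List Int) (m t : Nat) :
    (List.range m).map (fun q => (F.drop t).getD (m - 1 - q) 0) = pvRow F m (t : Int) := by
  unfold pvRow
  apply List.map_congr_left
  intro q hq
  rw [List.mem_range] at hq
  have hidx : (t : Int) + ((m : Int) - 1 - (q : Int)) = ((t + (m - 1 - q) : Nat) : Int) := by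
    omega
  rw [hidx, PySem.List.pyGetD_natCast]
  rw [List.getD_eq_getElem?_getD, List.getD_eq_getElem?_getD, List.getElem?_drop]

theorem pvGetDSetLen (a : List (List Int)) (i : Nat) (X : List Int)
    (hX : X.length = (a.getD i []).length) (k : Nat) :
    ((a.set i X).getD k []).length = (a.getD k []).length := by
  by_cases h : k = i
  · subst h
    by_cases hk : k < a.length
    · rw [List.getD_eq_getElem _ _ (by simpa using hk), List.getElem_set_self, hX,
        List.getD_eq_getElem _ _ hk]
    · rw [List.getD_eq_getElem?_getD, List.getElem?_eq_none (by simpa using hk),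
        List.getD_eq_getElem?_getD, List.getElem?_eq_none (by simpa using hk)]
  · rw [pvGetDSetNe [] a X i k h]

-- B's outer loop, coupled with A's cursor form: the stream is F past the cursor
theorem pvOuterCleanAlt (F : List Int) (m : Nat) :
    ∀ (ks : List Nat) (a : List (List Int)) (t : Nat), a ≠ [] →
      (PySem.List.pyGetD a 0 []).length = m → (∀ r ∈ a, m ≤ r.length) →
      (∀ i ∈ ks, i < a.length) →
      ks.foldl solutionFillInnerAlt (a, F.drop t)
        = ((ks.foldl (fun (s : List (List Int) × Int) (i : Nat) =>
              (s.1.set i (pvRow F m s.2 ++ (s.1.getD i []).drop m), s.2 + m))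
            (a, (t : Int))).1,
           F.drop (t + m * ks.length)) := by
  intro ks
  induction ks with
  | nil => intro a t _ _ _ _; simp
  | cons i ks ih =>
    intro a t ha h0 hge hks
    have hilen : i < a.length := hks i (List.mem_cons_self)
    have hgei : m ≤ (a.getD i []).length := by
      apply hge
      rw [List.getD_eq_getElem _ _ hilen]
      exact List.getElem_mem hilen
    simp only [List.foldl_cons]
    rw [pvInnerCleanAlt m a (F.drop t) i h0 hgei hilen]
    have hchunk : (List.range m).map (fun q => (F.drop t).getD (m - 1 - q) 0)
        = pvRow F m (t : Int) := pvChunkRow F m t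
    rw [hchunk, List.drop_drop]
    have hrowlen : (pvRow F m (t : Int)).length = m := by simp [pvRow]
    have hnewlen : (pvRow F m (t : Int) ++ (a.getD i []).drop m).length
        = (a.getD i []).length := by
      rw [List.length_append, hrowlen, List.length_drop]
      omega
    rw [ih (a.set i (pvRow F m (t : Int) ++ (a.getD i []).drop m)) (t + m)
      (by
        intro h
        apply ha
        have := congrArg List.length h
        simpa using this)
      (by
        have hget0 : ∀ (b : List (List Int)), PySem.List.pyGetD b 0 [] = b.getD 0 [] :=
          fun b => by rw [show (0 : Int) = ((0 : Nat) : Int) from rfl, PySem.List.pyGetD_natCast]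
        rw [hget0, pvGetDSetLen a i _ (by rw [hnewlen]), ← hget0]
        exact h0)
      (by
        intro r hr
        rcases List.mem_or_eq_of_mem_set hr with h | h
        · exact hge r h
        · subst h
          rw [hnewlen]
          exact hgei)
      (by
        intro j hj
        have := hks j (List.mem_cons_of_mem _ hj)
        simpa using this)]
    have hc : ((t + m : Nat) : Int) = (t : Int) + (m : Int) := by push_cast; ring
    rw [hc]
    apply Prod.ext
    · rfl
    · show F.drop (t + m + m * ks.length) = F.drop (t + m * (ks.length + 1))
      congr 1
      rw [Nat.mul_succ]
      omega

-- ===== VERDICT (by name: the statement is the Claim_ definition above) =====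
theorem solution_spec : Claim_equal_solution := by
  intro arr _ hpre
  unfold Spec_solution solution solution_alt
  rcases arr with _ | ⟨r0, rest⟩
  · rfl
  · dsimp only
    have hflat : List.foldl (fun acc item => acc ++ PySem.List.pyRepeat [item.1] item.2) []
          (PySem.List.sorted2
            (PySem.Dict.counter (List.flatMap (fun row => row) (r0 :: rest))).items
            (fun x => x.2) (fun x => x.1))
        = PySem.List.sorted2 (List.flatMap (fun row => row) (r0 :: rest))
            (fun x => (PySem.Dict.counter (List.flatMap (fun row => row) (r0 :: rest))).getD x 0)
            (fun x => x) := by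
      rw [PySem.List.foldl_append_eq_flatMap]
      simp only [List.nil_append, PySem.List.pyRepeat_singleton]
      exact pvExpandEqSortAll (List.flatMap (fun row => row) (r0 :: rest))
    rw [hflat]
    have hkey : (fun x : Int =>
          (PySem.Dict.counter (List.flatMap (fun row => row) (r0 :: rest))).getD x 0)
        = fun x : Int => (((List.flatMap (fun row => row) (r0 :: rest)).count x : Nat) : Int) := by
      funext x; rw [PySem.Dict.getD_counter]
    rw [hkey]
    set L := List.flatMap (fun row => row) (r0 :: rest) with hL
    set FF := PySem.List.sorted2 L (fun x => ((L.count x : Nat) : Int)) (fun x => x) false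
      with hFF
    set m := r0.length with hm
    have hge : ∀ r ∈ (r0 :: rest), m ≤ r.length := by
      intro r hr
      simpa using hpre r hr
    -- A side: normalise the reverse double loop to the cursor fold over [N-1, …, 0]
    rw [pvRangeDown (r0 :: rest).length]
    rw [pvOuterClean FF m _ (r0 :: rest) 0 (by simp)
      (by rw [show (0 : Int) = ((0 : Nat) : Int) from rfl, PySem.List.pyGetD_natCast]
          simpa using hm.symm)
      hge
      (by
        intro i hi
        obtain ⟨k, hk, rfl⟩ := List.mem_map.mp hi
        rw [List.mem_range] at hk
        constructor
        · omega
        · simp only [List.length_cons]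
          omega)]
    rw [List.foldl_map]
    have hcongr : (List.range (r0 :: rest).length).foldl
        (fun (s : List (List Int) × Int) (k : Nat) =>
          (s.1.set (((r0 :: rest).length : Int) - 1 - (k : Int)).toNat
            (pvRow FF m s.2 ++
              (s.1.getD (((r0 :: rest).length : Int) - 1 - (k : Int)).toNat []).drop m),
           s.2 + (m : Int)))
        ((r0 :: rest), 0)
      = (List.range (r0 :: rest).length).foldl
        (fun (s : List (List Int) × Int) (k : Nat) =>
          (s.1.set ((r0 :: rest).length - 1 - k)
            (pvRow FF m s.2 ++
              (s.1.getD ((r0 :: rest).length - 1 - k) []).drop m),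
           s.2 + (m : Int)))
        ((r0 :: rest), 0) := by
      apply PySem.List.foldl_congr_mem
      intro acc k hk
      rw [List.mem_range] at hk
      have ht : (((r0 :: rest).length : Int) - 1 - (k : Int)).toNat
          = (r0 :: rest).length - 1 - k := by omega
      rw [ht]
    rw [hcongr]
    -- B side: the selection loop is the ascending sort, the refill is the same cursor fold
    rw [pvSelEq L, ← hFF]
    have hB := pvOuterCleanAlt FF m ((List.range (r0 :: rest).length).reverse) (r0 :: rest) 0
      (by simp)
      (by rw [show (0 : Int) = ((0 : Nat) : Int) from rfl, PySem.List.pyGetD_natCast]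
          simpa using hm.symm)
      hge
      (by
        intro i hi
        rw [List.mem_reverse, List.mem_range] at hi
        simpa using hi)
    rw [List.drop_zero] at hB
    rw [hB, pvRevRange, List.foldl_map]
    norm_num
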